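-- pv_equiv track=rewrite | github.com/marksdhillon/sens-dashboard | build.py | compute_vs_above500
-- ===== SOURCE A (Python) =====
-- def compute_vs_above500(results, above500):
--     w, l, otl = 0, 0, 0
--     for r in results:
--         if r["oppAbbrev"] in above500:
--             if r["result"] == "W": w += 1
--             elif r["result"] == "L": l += 1
--             else: otl += 1
--     return w, l, otl
-- ===== SOURCE B (Python) =====
-- def compute_vs_above500(results, above500):
--     opps = set(above500)
--     relevant = sum(1 for r in results if r["oppAbbrev"] in opps)
--     w = sum(1 for r in results if r["oppAbbrev"] in opps and r["result"] == "W")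
--     l = sum(1 for r in results if r["oppAbbrev"] in opps and r["result"] == "L")
--     return w, l, relevant - w - l
-- ===== Notes on version B (the rewrite author's own statement) =====
-- stated objective: alternative
-- what changed: Replaces A's single stateful pass with three mutable accumulators and an if/elif/else chain by staged counting passes over a precomputed opponent set: one pass counts relevant games, one counts W, one counts L, and OTL is derived arithmetically as relevant - w - l, preserving the else-bucket semantics.
import Mathlib
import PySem

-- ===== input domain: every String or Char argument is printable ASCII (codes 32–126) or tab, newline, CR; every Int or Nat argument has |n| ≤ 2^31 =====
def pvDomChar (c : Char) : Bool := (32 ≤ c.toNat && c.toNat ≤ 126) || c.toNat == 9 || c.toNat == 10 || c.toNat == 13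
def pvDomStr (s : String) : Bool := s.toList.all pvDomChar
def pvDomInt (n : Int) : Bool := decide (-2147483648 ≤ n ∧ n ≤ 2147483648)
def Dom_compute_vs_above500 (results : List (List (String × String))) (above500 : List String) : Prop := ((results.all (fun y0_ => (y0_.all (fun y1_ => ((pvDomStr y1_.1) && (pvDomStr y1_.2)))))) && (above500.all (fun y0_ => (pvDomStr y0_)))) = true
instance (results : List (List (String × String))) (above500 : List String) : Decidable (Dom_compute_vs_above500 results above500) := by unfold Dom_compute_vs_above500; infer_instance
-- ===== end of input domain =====

-- B replaces A's single three-accumulator pass by staged counting passes over a precomputed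
-- opponent set, deriving OTL as relevant - w - l (objective: alternative decomposition).

-- ===== PORT A =====
-- dict lookup r["k"] = first match in the association list; Pre_ below excludes KeyError,
-- so inside Pre_ the `.getD ""` defaults are never taken.
def compute_vs_above500 (results : List (List (String × String))) (above500 : List String) : Int × Int × Int :=
  results.foldl
    (fun (s : Int × Int × Int) r =>
      let (w, l, otl) := s
      if ((List.lookup "oppAbbrev" r).getD "") ∈ above500 then
        if ((List.lookup "result" r).getD "") = "W" then (w + 1, l, otl)
        else if ((List.lookup "result" r).getD "") = "L" then (w, l + 1, otl)
        else (w, l, otl + 1)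
      else s)
    (0, 0, 0)

-- ===== PORT B =====
-- sum(1 for r in results if cond) ported as countP; set(above500) as PySem.Set.ofList.
def compute_vs_above500_alt (results : List (List (String × String))) (above500 : List String) : Int × Int × Int :=
  let opps := PySem.Set.ofList above500
  let relevant : Int :=
    (results.countP (fun r => PySem.Set.contains opps ((List.lookup "oppAbbrev" r).getD "")) : Nat)
  let w : Int :=
    (results.countP (fun r =>
      PySem.Set.contains opps ((List.lookup "oppAbbrev" r).getD "") &&
        (((List.lookup "result" r).getD "") == "W")) : Nat)
  let l : Int :=
    (results.countP (fun r =>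
      PySem.Set.contains opps ((List.lookup "oppAbbrev" r).getD "") &&
        (((List.lookup "result" r).getD "") == "L")) : Nat)
  (w, l, relevant - w - l)

-- ===== PRECONDITION & SPEC =====
-- Pre_ excludes exactly the inputs where Python A raises KeyError: a game record missing
-- the "oppAbbrev" key, or missing "result" when its opponent is in above500.
def Pre_compute_vs_above500 (results : List (List (String × String))) (above500 : List String) : Prop :=
  ∀ r ∈ results, (List.lookup "oppAbbrev" r).isSome = true ∧
    (((List.lookup "oppAbbrev" r).getD "") ∈ above500 → (List.lookup "result" r).isSome = true)
instance (results : List (List (String × String))) (above500 : List String) : Decidable (Pre_compute_vs_above500 results above500) := by unfold Pre_compute_vs_above500; infer_instance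

def pvWitness_compute_vs_above500 : (List (List (String × String))) × List String :=
  ([[("oppAbbrev", "TOR"), ("result", "W")], [("oppAbbrev", "BOS"), ("result", "OT")]], ["TOR", "BOS"])

def Spec_compute_vs_above500 (results : List (List (String × String))) (above500 : List String) (out : Int × Int × Int) : Prop := out = compute_vs_above500_alt results above500
instance (results : List (List (String × String))) (above500 : List String) (out : Int × Int × Int) : Decidable (Spec_compute_vs_above500 results above500 out) := by unfold Spec_compute_vs_above500; infer_instance

-- ===== CLAIM (what is proved, stated in full; the proofs are below) =====
def Claim_equal_compute_vs_above500 : Prop := ∀ (results : List (List (String × String))) (above500 : List String), Dom_compute_vs_above500 results above500 → Pre_compute_vs_above500 results above500 → Spec_compute_vs_above500 results above500 (compute_vs_above500 results above500)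

-- ===== LEMMAS AND PROOFS =====

lemma pv_contains_ofList (l : List String) (x : String) :
    PySem.Set.contains (PySem.Set.ofList l) x = decide (x ∈ l) := by
  simp [PySem.Set.mem_ofList]

lemma pv_fold_counts (above500 : List String) (results : List (List (String × String))) :
    ∀ w l otl : Int,
      results.foldl
        (fun (s : Int × Int × Int) r =>
          let (w, l, otl) := s
          if ((List.lookup "oppAbbrev" r).getD "") ∈ above500 then
            if ((List.lookup "result" r).getD "") = "W" then (w + 1, l, otl)
            else if ((List.lookup "result" r).getD "") = "L" then (w, l + 1, otl)
            else (w, l, otl + 1)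
          else s)
        (w, l, otl)
      = (w + (results.countP (fun r =>
            decide (((List.lookup "oppAbbrev" r).getD "") ∈ above500) &&
              (((List.lookup "result" r).getD "") == "W")) : Nat),
         l + (results.countP (fun r =>
            decide (((List.lookup "oppAbbrev" r).getD "") ∈ above500) &&
              (((List.lookup "result" r).getD "") == "L")) : Nat),
         otl + ((results.countP (fun r =>
            decide (((List.lookup "oppAbbrev" r).getD "") ∈ above500)) : Nat)
          - (results.countP (fun r =>
            decide (((List.lookup "oppAbbrev" r).getD "") ∈ above500) &&
              (((List.lookup "result" r).getD "") == "W")) : Nat)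
          - (results.countP (fun r =>
            decide (((List.lookup "oppAbbrev" r).getD "") ∈ above500) &&
              (((List.lookup "result" r).getD "") == "L")) : Nat))) := by
  induction results with
  | nil => intro w l otl; simp
  | cons r rs ih =>
    intro w l otl
    by_cases hmem : ((List.lookup "oppAbbrev" r).getD "") ∈ above500
    · by_cases hW : ((List.lookup "result" r).getD "") = "W"
      · simp only [List.foldl_cons, hmem, hW, if_true]
        rw [ih]
        have hL : ¬ ((List.lookup "result" r).getD "") = "L" := by simp [hW]
        simp [hmem, hW, Prod.ext_iff]
        omega
      · by_cases hL : ((List.lookup "result" r).getD "") = "L"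
        · simp only [List.foldl_cons, hmem, if_true, hL]
          rw [ih]
          simp [hmem, hL, Prod.ext_iff]
          omega
        · simp only [List.foldl_cons, hmem, if_true, if_neg hW, if_neg hL]
          rw [ih]
          simp [hmem, hW, hL, Prod.ext_iff]
          omega
    · simp only [List.foldl_cons]
      rw [if_neg hmem, ih]
      simp [hmem]

-- ===== VERDICT (by name: the statement is the Claim_ definition above) =====
theorem compute_vs_above500_spec : Claim_equal_compute_vs_above500 := by
  intro results above500 _ _
  unfold Spec_compute_vs_above500 compute_vs_above500 compute_vs_above500_alt
  rw [pv_fold_counts above500 results 0 0 0]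
  simp only [pv_contains_ofList]
  simp
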